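-- pv_equiv track=rewrite | github.com/juanielosegui/td1 | TP 1 TD/cafetero.py | cafeteros_entre
-- ===== SOURCE A (Python) =====
-- from typing import List
--
-- def filtrarCAFE_BD (texto:str) -> str:
--     ''' Requiere: nada.
--         Devuelve: dado un string s, devuelve un
--         nuevo string formado por las letras C, A, F, E, B, o D
--         que aparezcan en s, en el mismo orden de
--         ocurrencia.
--     '''
--     res:str = ''
--     i:int=0
--     while i < len(texto):
--         if texto[i] == 'C' or texto[i] == 'A' or texto[i] == 'F' or texto[i] == 'E' or texto[i] =='B'  or texto[i] == 'D':
--             res = res + texto[i]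
--
--         i = i + 1
--
--     return res
--
-- def es_cafetero (num: int)->bool:
--     '''Requiere:  n >= 0
--     Devuelve: True si n es cafetero (es decir, si y solo si su
--     representacion hexadecimal contiene exactamente una
--     ocurrencia de los símbolos C, A, F y E, en ese orden y sin repeticiones,
--     y no contiene ocurrencias de los símbolos B y D),
--     y si no lo es, False.
--     '''
--     #convertimos el número entero ingresado a un número hexadecimal y convertimos sus caracteras a mayúscula para luego convertirlo en string y poder ingresarlo como argumento en la función filtrarCAFE_BD para que nos devuelva un nuevo string que almacenaremos en la variable num.
--     num:str = filtrarCAFE_BD(str(hex(num).upper()))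
--     #comparamos si el nuevo string num es igual a 'CAFE' para determinar si es un número cafetero.
--     return num == 'CAFE'
--
-- def cafeteros_entre (n:int, m:int) -> (int):
--     '''
--     Requiere: n >= 1, m >= n
--     Devuelve: la lista de números cafeteros entre n y m,
--     inclusive en ambos casos (es decir, mayores o iguales a n,
--     y menores o iguales a m), ordenada de menor a mayor.
--     '''
--     #creamos una variable de bucle llamada num. Esta va a valer el numero que se le ingrese al parámetro n y creamos una lista llamada cafeteros que empieza vacía y en el caso de que haya numeros cafeteros entre n y m se almacenaran en esa lista.
--     num: int = n
--     cafeteros: List[int] = []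
--
--     while num <= m:
--         #en cada repetición del ciclo aplicamos la función es_cafetero para verificar si num lo es, en el caso de que lo sea lo añadimos a la lista e incrementamos en 1 a num. Y si num no es cafetero no modificamos la lista e incrementamos en 1 a num.
--         if es_cafetero(num):
--             cafeteros.append(num)
--         num = num + 1
--     return cafeteros
-- ===== SOURCE B (Python) =====
-- def _check(v, st):
--     # digit state machine over hex digits of v, least-significant first:
--     # st counts how many of E, F, A, C (LSB order) have been matched so far
--     if v == 0:
--         return st == 4
--     d = v % 16
--     if d < 10:
--         return _check(v // 16, st)
--     if d == 14 and st == 0: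
--         return _check(v // 16, 1)
--     if d == 15 and st == 1:
--         return _check(v // 16, 2)
--     if d == 10 and st == 2:
--         return _check(v // 16, 3)
--     if d == 12 and st == 3:
--         return _check(v // 16, 4)
--     return False
--
-- def cafeteros_entre(n, m):
--     return [x for x in range(n, m + 1) if _check(abs(x), 0)]
-- ===== Notes on version B (the rewrite author's own statement) =====
-- stated objective: alternative
-- what changed: A builds the hex string of each number, uppercases it, filters the letters C/A/F/E/B/D with a while loop and compares to 'CAFE'; B tests each number with a purely numeric state machine over its hex digits (repeated divmod by 16), no string construction at all, and collects matches with a comprehension over range.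
import Mathlib
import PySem

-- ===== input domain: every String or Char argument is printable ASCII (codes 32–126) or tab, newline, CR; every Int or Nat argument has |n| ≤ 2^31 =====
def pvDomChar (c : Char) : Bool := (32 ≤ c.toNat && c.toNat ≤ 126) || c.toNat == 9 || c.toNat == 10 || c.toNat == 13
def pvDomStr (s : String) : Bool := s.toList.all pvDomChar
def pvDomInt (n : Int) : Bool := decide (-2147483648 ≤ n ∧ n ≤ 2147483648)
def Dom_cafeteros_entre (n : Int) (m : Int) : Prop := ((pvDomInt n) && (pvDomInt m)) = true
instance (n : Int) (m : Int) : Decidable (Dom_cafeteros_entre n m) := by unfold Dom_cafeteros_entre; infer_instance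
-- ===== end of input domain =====

-- B replaces A's hex-string building + letter filtering + string comparison by a purely
-- numeric state machine over the hex digits of |x| (objective: alternative/constant-factor).

-- ===== PORT A =====
-- hex(num): lowercase hex digit character (0..15 → '0'..'9','a'..'f')
def pvHexChar (d : Nat) : Char := if d < 10 then Char.ofNat (48 + d) else Char.ofNat (87 + d)

-- the digit part of Python's hex(v) for v ≥ 0 (most significant first)
def pvHexDigits (v : Nat) : List Char :=
  if _h : v < 16 then [pvHexChar v]
  else pvHexDigits (v / 16) ++ [pvHexChar (v % 16)]
decreasing_by exact Nat.div_lt_self (by omega) (by omega)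

-- the big or-condition of A's while-loop body, in the same order
def pvCAFEBD (c : Char) : Bool :=
  c == 'C' || c == 'A' || c == 'F' || c == 'E' || c == 'B' || c == 'D'

-- A's while-i loop over the characters, accumulating res
def filtrarCAFE_BD (texto : List Char) : List Char :=
  texto.foldl (fun res c => if pvCAFEBD c then res ++ [c] else res) []

-- str(hex(num).upper()) then filter, compared with 'CAFE'
def es_cafetero (num : Int) : Bool :=
  filtrarCAFE_BD (PySem.Chars.upper
    ((if num < 0 then ['-'] else []) ++ ['0', 'x'] ++ pvHexDigits num.natAbs))
    == ['C', 'A', 'F', 'E']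

-- A's while num <= m loop with the appended list
def pvLoopA (m : Int) (num : Int) (cafeteros : List Int) : List Int :=
  if num ≤ m then
    pvLoopA m (num + 1) (if es_cafetero num then cafeteros ++ [num] else cafeteros)
  else cafeteros
termination_by (m + 1 - num).toNat
decreasing_by omega

def cafeteros_entre (n : Int) (m : Int) : List Int := pvLoopA m n []

-- ===== PORT B =====
-- state machine over hex digits of v, least significant first; st = how many of E,F,A,C matched
def pvCheck (v : Nat) (st : Nat) : Bool :=
  if h : v = 0 then st == 4
  else
    let d := v % 16
    if d < 10 then pvCheck (v / 16) st
    else if d == 14 && st == 0 then pvCheck (v / 16) 1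
    else if d == 15 && st == 1 then pvCheck (v / 16) 2
    else if d == 10 && st == 2 then pvCheck (v / 16) 3
    else if d == 12 && st == 3 then pvCheck (v / 16) 4
    else false
decreasing_by all_goals exact Nat.div_lt_self (Nat.pos_of_ne_zero h) (by omega)

def cafeteros_entre_alt (n : Int) (m : Int) : List Int :=
  (PySem.List.pyRange n (m + 1)).filter (fun x => pvCheck x.natAbs 0)

-- ===== PRECONDITION & SPEC =====
def Spec_cafeteros_entre (n : Int) (m : Int) (out : List Int) : Prop := out = cafeteros_entre_alt n m
instance (n : Int) (m : Int) (out : List Int) : Decidable (Spec_cafeteros_entre n m out) := by unfold Spec_cafeteros_entre; infer_instance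

-- ===== CLAIM (what is proved, stated in full; the proofs are below) =====
def Claim_equal_cafeteros_entre : Prop := ∀ (n : Int) (m : Int), Dom_cafeteros_entre n m → Spec_cafeteros_entre n m (cafeteros_entre n m)

-- ===== LEMMAS AND PROOFS =====

-- uppercase hex letter for a digit 10..15
def pvUC (d : Nat) : Char := Char.ofNat (55 + d)

-- the hex letters (≥ 10) of v, uppercase, LEAST significant first
def pvRL (v : Nat) : List Char :=
  if _h : v = 0 then []
  else (if 10 ≤ v % 16 then [pvUC (v % 16)] else []) ++ pvRL (v / 16)
decreasing_by exact Nat.div_lt_self (by omega) (by omega)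

lemma filtrar_eq_filter (texto : List Char) :
    filtrarCAFE_BD texto = texto.filter pvCAFEBD := by
  unfold filtrarCAFE_BD
  simpa using PySem.List.foldl_append_if pvCAFEBD id texto []

lemma filter_upper_digit (d : Nat) (hd : d < 16) :
    List.filter pvCAFEBD (PySem.Chars.upper [pvHexChar d]) =
      if 10 ≤ d then [pvUC d] else [] := by
  interval_cases d <;> decide

lemma filter_upper_hexDigits (v : Nat) :
    List.filter pvCAFEBD (PySem.Chars.upper (pvHexDigits v)) = (pvRL v).reverse := by
  induction v using Nat.strong_induction_on with
  | _ v ih =>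
    rw [pvHexDigits, pvRL]
    by_cases h16 : v < 16
    · rw [dif_pos h16]
      rw [filter_upper_digit v h16]
      by_cases h0 : v = 0
      · subst h0; decide
      · rw [dif_neg h0]
        have : v / 16 = 0 := Nat.div_eq_of_lt h16
        rw [this, pvRL]
        simp only [Nat.mod_eq_of_lt h16]
        split <;> simp
    · rw [dif_neg h16]
      have h0 : ¬ v = 0 := by omega
      rw [dif_neg h0]
      have hrec := ih (v / 16) (Nat.div_lt_self (by omega) (by omega))
      simp only [PySem.Chars.upper, List.map_append, List.filter_append,
        List.reverse_append]
      rw [← PySem.Chars.upper]  -- restore on the recursive part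
      rw [hrec]
      congr 1
      have := filter_upper_digit (v % 16) (Nat.mod_lt _ (by omega))
      simp only [PySem.Chars.upper] at this ⊢
      rw [this]
      split <;> simp

lemma pvUC_10 : pvUC 10 = 'A' := by decide
lemma pvUC_11 : pvUC 11 = 'B' := by decide
lemma pvUC_12 : pvUC 12 = 'C' := by decide
lemma pvUC_13 : pvUC 13 = 'D' := by decide
lemma pvUC_14 : pvUC 14 = 'E' := by decide
lemma pvUC_15 : pvUC 15 = 'F' := by decide

lemma pvCheck_iff (v : Nat) : ∀ st : Nat, st ≤ 4 →
    (pvCheck v st = true ↔ pvRL v = List.drop st ['E', 'F', 'A', 'C']) := by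
  induction v using Nat.strong_induction_on with
  | _ v ih =>
    intro st hst
    rw [pvCheck, pvRL]
    by_cases h0 : v = 0
    · rw [dif_pos h0, dif_pos h0]
      interval_cases st <;> simp
    · rw [dif_neg h0, dif_neg h0]
      have hlt : v / 16 < v := Nat.div_lt_self (Nat.pos_of_ne_zero h0) (by omega)
      have hd : v % 16 < 16 := Nat.mod_lt _ (by omega)
      interval_cases h : v % 16 <;>
        simp only [pvUC_10, pvUC_11, pvUC_12, pvUC_13, pvUC_14, pvUC_15] <;>
        interval_cases st <;>
        simp_all [ih (v / 16) hlt 0, ih (v / 16) hlt 1, ih (v / 16) hlt 2,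
          ih (v / 16) hlt 3, ih (v / 16) hlt 4]

lemma es_eq_pvCheck (num : Int) : es_cafetero num = pvCheck num.natAbs 0 := by
  rw [Bool.eq_iff_iff]
  unfold es_cafetero
  rw [beq_iff_eq, filtrar_eq_filter]
  have hsplit : PySem.Chars.upper ((if num < 0 then ['-'] else []) ++ ['0', 'x'] ++ pvHexDigits num.natAbs)
      = PySem.Chars.upper ((if num < 0 then ['-'] else []) ++ ['0', 'x'])
        ++ PySem.Chars.upper (pvHexDigits num.natAbs) := by
    simp [PySem.Chars.upper]
  rw [hsplit, List.filter_append, filter_upper_hexDigits]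
  have hpre : List.filter pvCAFEBD
      (PySem.Chars.upper ((if num < 0 then ['-'] else []) ++ ['0', 'x'])) = [] := by
    split <;> decide
  rw [hpre, List.nil_append, pvCheck_iff num.natAbs 0 (by omega)]
  constructor
  · intro hrev
    have := congrArg List.reverse hrev
    simpa using this
  · intro hl; rw [hl]; rfl

lemma pvLoopA_eq (m num : Int) (acc : List Int) :
    pvLoopA m num acc = acc ++ (PySem.List.pyRange num (m + 1)).filter es_cafetero := by
  fun_induction pvLoopA m num acc with
  | case1 num acc hle ihn =>
    simp only [dite_eq_ite] at ihn
    rw [ihn]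
    rw [PySem.List.pyRange_one_cons (by omega : num < m + 1)]
    rw [List.filter_cons]
    by_cases hc : es_cafetero num
    · rw [if_pos hc, if_pos hc]; simp
    · rw [if_neg (by simpa using hc), if_neg (by simpa using hc)]
  | case2 num acc hle =>
    have : PySem.List.pyRange num (m + 1) = [] := by
      rw [List.eq_nil_iff_forall_not_mem]
      intro x hx
      rw [PySem.List.mem_pyRange_one] at hx
      omega
    rw [this]; simp

-- ===== VERDICT (by name: the statement is the Claim_ definition above) =====
theorem cafeteros_entre_spec : Claim_equal_cafeteros_entre := by
  intro n m _
  unfold Spec_cafeteros_entre cafeteros_entre cafeteros_entre_alt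
  rw [pvLoopA_eq, List.nil_append]
  exact List.filter_congr (fun x _ => es_eq_pvCheck x)
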